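-- pv_equiv track=rewrite | github.com/zera-bot/defusal-solvers | solvers.py | solveTiles
-- ===== SOURCE A (Python) =====
-- def solveTiles(colors):
--     total = 0
--     for c in colors:
--         if c in ["red","r"]: total+=1
--         if c in ["green","g"]: total+=9
--         if c in ["blue","b"]: total+=7
--         if c in ["yellow","y"]: total+=2
--         if c in ["pink","p","i"]: total+=6
--         if c in ["white","w"]: total+=5
--     return total
-- ===== SOURCE B (Python) =====
-- def solveTiles(colors):
--     cnt = {}
--     for c in colors:
--         cnt[c] = cnt.get(c, 0) + 1
--     g = cnt.get
--     return (1 * (g("red", 0) + g("r", 0))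
--             + 9 * (g("green", 0) + g("g", 0))
--             + 7 * (g("blue", 0) + g("b", 0))
--             + 2 * (g("yellow", 0) + g("y", 0))
--             + 6 * (g("pink", 0) + g("p", 0) + g("i", 0))
--             + 5 * (g("white", 0) + g("w", 0)))
-- ===== Notes on version B (the rewrite author's own statement) =====
-- stated objective: alternative
-- what changed: B builds a frequency dictionary of the colors in one pass and then computes the total as a weighted sum over the fixed six weight groups, instead of A's per-element chain of six membership tests.
import Mathlib
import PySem

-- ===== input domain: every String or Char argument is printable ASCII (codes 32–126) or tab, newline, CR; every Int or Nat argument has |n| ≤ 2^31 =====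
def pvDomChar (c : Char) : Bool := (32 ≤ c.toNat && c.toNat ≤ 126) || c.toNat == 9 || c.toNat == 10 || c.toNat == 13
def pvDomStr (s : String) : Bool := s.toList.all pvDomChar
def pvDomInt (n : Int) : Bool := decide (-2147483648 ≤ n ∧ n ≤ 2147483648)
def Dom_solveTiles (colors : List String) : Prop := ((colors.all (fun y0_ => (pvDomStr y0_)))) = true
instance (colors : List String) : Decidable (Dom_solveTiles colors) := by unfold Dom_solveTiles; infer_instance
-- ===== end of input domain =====

-- B replaces A's per-element chain of six membership tests by a one-pass frequency
-- dictionary followed by a weighted sum over the six fixed weight groups (alternative decomposition).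

-- ===== PORT A =====
def solveTiles (colors : List String) : Int :=
  colors.foldl (fun total c =>
    let total := if c = "red" ∨ c = "r" then total + 1 else total
    let total := if c = "green" ∨ c = "g" then total + 9 else total
    let total := if c = "blue" ∨ c = "b" then total + 7 else total
    let total := if c = "yellow" ∨ c = "y" then total + 2 else total
    let total := if c = "pink" ∨ c = "p" ∨ c = "i" then total + 6 else total
    let total := if c = "white" ∨ c = "w" then total + 5 else total
    total) 0

-- ===== PORT B =====
def solveTiles_alt (colors : List String) : Int :=
  let cnt : PySem.Dict String Int :=
    colors.foldl (fun d c => d.insert c (d.getD c 0 + 1)) PySem.Dict.empty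
  1 * (cnt.getD "red" 0 + cnt.getD "r" 0)
    + 9 * (cnt.getD "green" 0 + cnt.getD "g" 0)
    + 7 * (cnt.getD "blue" 0 + cnt.getD "b" 0)
    + 2 * (cnt.getD "yellow" 0 + cnt.getD "y" 0)
    + 6 * (cnt.getD "pink" 0 + cnt.getD "p" 0 + cnt.getD "i" 0)
    + 5 * (cnt.getD "white" 0 + cnt.getD "w" 0)

-- ===== PRECONDITION & SPEC =====
def Spec_solveTiles (colors : List String) (out : Int) : Prop := out = solveTiles_alt colors
instance (colors : List String) (out : Int) : Decidable (Spec_solveTiles colors out) := by unfold Spec_solveTiles; infer_instance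

-- ===== CLAIM (what is proved, stated in full; the proofs are below) =====
def Claim_equal_solveTiles : Prop := ∀ (colors : List String), Dom_solveTiles colors → Spec_solveTiles colors (solveTiles colors)

-- ===== LEMMAS AND PROOFS =====

/-- Per-element weight of A's if-chain. -/
def pvW (c : String) : Int :=
  (if c = "red" ∨ c = "r" then 1 else 0)
  + (if c = "green" ∨ c = "g" then 9 else 0)
  + (if c = "blue" ∨ c = "b" then 7 else 0)
  + (if c = "yellow" ∨ c = "y" then 2 else 0)
  + (if c = "pink" ∨ c = "p" ∨ c = "i" then 6 else 0)
  + (if c = "white" ∨ c = "w" then 5 else 0)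

lemma pvW_step (t : Int) (c : String) :
    (let total := if c = "red" ∨ c = "r" then t + 1 else t
     let total := if c = "green" ∨ c = "g" then total + 9 else total
     let total := if c = "blue" ∨ c = "b" then total + 7 else total
     let total := if c = "yellow" ∨ c = "y" then total + 2 else total
     let total := if c = "pink" ∨ c = "p" ∨ c = "i" then total + 6 else total
     let total := if c = "white" ∨ c = "w" then total + 5 else total
     total) = t + pvW c := by
  simp only [pvW]
  split_ifs <;> ring

lemma solveTiles_eq_sum (cs : List String) :
    solveTiles cs = (cs.map pvW).sum := by
  simp [solveTiles, pvW_step, PySem.List.foldl_add]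

/-- B as weighted counts. -/
lemma solveTiles_alt_counts (cs : List String) :
    solveTiles_alt cs =
      1 * ((cs.count "red" : Int) + cs.count "r")
      + 9 * ((cs.count "green" : Int) + cs.count "g")
      + 7 * ((cs.count "blue" : Int) + cs.count "b")
      + 2 * ((cs.count "yellow" : Int) + cs.count "y")
      + 6 * ((cs.count "pink" : Int) + cs.count "p" + cs.count "i")
      + 5 * ((cs.count "white" : Int) + cs.count "w") := by
  simp [solveTiles_alt, PySem.Dict.foldl_insert_getD_add_one_eq_counter,
    PySem.Dict.getD_counter]

/-- Per-element weight as a weighted sum of equality indicators. -/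
lemma pvW_eq (c : String) :
    pvW c =
      1 * ((if c = "red" then (1:Int) else 0) + (if c = "r" then (1:Int) else 0))
      + 9 * ((if c = "green" then (1:Int) else 0) + (if c = "g" then (1:Int) else 0))
      + 7 * ((if c = "blue" then (1:Int) else 0) + (if c = "b" then (1:Int) else 0))
      + 2 * ((if c = "yellow" then (1:Int) else 0) + (if c = "y" then (1:Int) else 0))
      + 6 * ((if c = "pink" then (1:Int) else 0) + (if c = "p" then (1:Int) else 0)
             + (if c = "i" then (1:Int) else 0))
      + 5 * ((if c = "white" then (1:Int) else 0) + (if c = "w" then (1:Int) else 0)) := by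
  by_cases h1 : c = "red"; · subst h1; decide
  by_cases h2 : c = "r"; · subst h2; decide
  by_cases h3 : c = "green"; · subst h3; decide
  by_cases h4 : c = "g"; · subst h4; decide
  by_cases h5 : c = "blue"; · subst h5; decide
  by_cases h6 : c = "b"; · subst h6; decide
  by_cases h7 : c = "yellow"; · subst h7; decide
  by_cases h8 : c = "y"; · subst h8; decide
  by_cases h9 : c = "pink"; · subst h9; decide
  by_cases h10 : c = "p"; · subst h10; decide
  by_cases h11 : c = "i"; · subst h11; decide
  by_cases h12 : c = "white"; · subst h12; decide
  by_cases h13 : c = "w"; · subst h13; decide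
  simp [pvW, h1, h2, h3, h4, h5, h6, h7, h8, h9, h10, h11, h12, h13]

lemma sum_pvW_eq_counts : ∀ (cs : List String),
    (cs.map pvW).sum =
      1 * ((cs.count "red" : Int) + cs.count "r")
      + 9 * ((cs.count "green" : Int) + cs.count "g")
      + 7 * ((cs.count "blue" : Int) + cs.count "b")
      + 2 * ((cs.count "yellow" : Int) + cs.count "y")
      + 6 * ((cs.count "pink" : Int) + cs.count "p" + cs.count "i")
      + 5 * ((cs.count "white" : Int) + cs.count "w")
  | [] => by simp
  | c :: cs => by
    simp only [List.map_cons, List.sum_cons, List.count_cons, beq_iff_eq,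
      sum_pvW_eq_counts cs]
    push_cast
    rw [pvW_eq]
    ring

-- ===== VERDICT (by name: the statement is the Claim_ definition above) =====
theorem solveTiles_spec : Claim_equal_solveTiles := by
  intro colors _
  unfold Spec_solveTiles
  rw [solveTiles_eq_sum, solveTiles_alt_counts, sum_pvW_eq_counts]
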